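-- pv_equiv track=rewrite | github.com/himanshibansal-max/agent-loop-harness | mcp_tools/server.py | _compute_project_stats
-- ===== SOURCE A (Python) =====
-- from collections import Counter, defaultdict
--
-- def _compute_project_stats(violations: list) -> dict:
--     stats: dict = defaultdict(lambda: {"HIGH": 0, "MEDIUM": 0, "LOW": 0, "total": 0})
--     for v in violations:
--         p = (v.get("project") or "").strip()
--         if not p:
--             continue
--         sev = v.get("severity", "LOW")
--         if sev not in ("HIGH", "MEDIUM", "LOW"):
--             sev = "LOW"
--         stats[p][sev] += 1
--         stats[p]["total"] += 1
--     return stats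
-- ===== SOURCE B (Python) =====
-- from collections import defaultdict
--
--
-- def _norm(v):
--     p = (v.get("project") or "").strip()
--     if not p:
--         return None
--     sev = v.get("severity", "LOW")
--     return (p, sev if sev in ("HIGH", "MEDIUM", "LOW") else "LOW")
--
--
-- def _compute_project_stats(violations: list) -> dict:
--     pairs = [t for t in map(_norm, violations) if t is not None]
--     result = defaultdict(lambda: {"HIGH": 0, "MEDIUM": 0, "LOW": 0, "total": 0})
--     for p in dict.fromkeys(q for q, _ in pairs):
--         h = pairs.count((p, "HIGH"))
--         m = pairs.count((p, "MEDIUM"))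
--         l = pairs.count((p, "LOW"))
--         result[p] = {"HIGH": h, "MEDIUM": m, "LOW": l, "total": h + m + l}
--     return result
-- ===== Notes on version B (the rewrite author's own statement) =====
-- stated objective: alternative
-- what changed: A builds the result in one pass by incrementally bumping counters inside a defaultdict of per-project dicts; B first normalizes violations into (project, severity) pairs, dedups the projects in first-seen order, and then builds each project's row in one shot by recounting the pairs list, assigning whole rows instead of mutating counters.
import Mathlib
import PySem

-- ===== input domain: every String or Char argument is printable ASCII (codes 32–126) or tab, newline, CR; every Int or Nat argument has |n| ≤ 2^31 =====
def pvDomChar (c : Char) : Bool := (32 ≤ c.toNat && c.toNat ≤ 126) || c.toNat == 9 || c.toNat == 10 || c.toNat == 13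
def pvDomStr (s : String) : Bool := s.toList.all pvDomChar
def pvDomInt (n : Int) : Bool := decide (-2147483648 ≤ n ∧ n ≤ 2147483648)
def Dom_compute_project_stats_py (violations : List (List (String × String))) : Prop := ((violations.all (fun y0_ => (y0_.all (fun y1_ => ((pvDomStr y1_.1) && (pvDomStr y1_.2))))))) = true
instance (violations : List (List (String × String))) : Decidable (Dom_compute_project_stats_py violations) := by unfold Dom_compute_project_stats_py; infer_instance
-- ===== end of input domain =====

-- B replaces A's single-pass incremental defaultdict updating by a two-phase group-by
-- (normalize+filter, ordered key dedup, then a per-project recount); alternative decomposition, not faster.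

-- ===== PORT A =====

def pvTemplate : PySem.Dict String Int :=
  PySem.Dict.ofList [("HIGH", 0), ("MEDIUM", 0), ("LOW", 0), ("total", 0)]

def pvStepA (stats : PySem.Dict String (PySem.Dict String Int)) (v : List (String × String)) :
    PySem.Dict String (PySem.Dict String Int) :=
  let p := PySem.Str.strip (((PySem.Dict.mk v).get? "project").getD "")
  if p = "" then stats
  else
    let sev0 := (PySem.Dict.mk v).getD "severity" "LOW"
    let sev := if sev0 = "HIGH" ∨ sev0 = "MEDIUM" ∨ sev0 = "LOW" then sev0 else "LOW"
    let d1 := stats.insert p (((stats.get? p).getD pvTemplate).modify sev 0 (· + 1))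
    d1.insert p (((d1.get? p).getD pvTemplate).modify "total" 0 (· + 1))

def pvNormB (v : List (String × String)) : Option (String × String) :=
  let p := PySem.Str.strip (((PySem.Dict.mk v).get? "project").getD "")
  if p = "" then none
  else
    let sev := (PySem.Dict.mk v).getD "severity" "LOW"
    some (p, if sev = "HIGH" ∨ sev = "MEDIUM" ∨ sev = "LOW" then sev else "LOW")

def pvRowB (pairs : List (String × String)) (p : String) : List (String × Int) :=
  let h : Int := pairs.count (p, "HIGH")
  let m : Int := pairs.count (p, "MEDIUM")
  let l : Int := pairs.count (p, "LOW")
  [("HIGH", h), ("MEDIUM", m), ("LOW", l), ("total", h + m + l)]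


def compute_project_stats_py (violations : List (List (String × String))) :
    List (String × List (String × Int)) :=
  (violations.foldl pvStepA PySem.Dict.empty).items.map (fun kv => (kv.1, kv.2.items))

-- ===== PORT B =====
def compute_project_stats_py_alt (violations : List (List (String × String))) :
    List (String × List (String × Int)) :=
  let pairs := violations.filterMap pvNormB
  let result := (PySem.List.dedup (pairs.map Prod.fst)).foldl
      (fun d p => d.insert p (PySem.Dict.mk (pvRowB pairs p))) PySem.Dict.empty
  result.items.map (fun kv => (kv.1, kv.2.items))

-- ===== PRECONDITION & SPEC =====
def Spec_compute_project_stats_py (violations : List (List (String × String))) (out : List (String × List (String × Int))) : Prop := out = compute_project_stats_py_alt violations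
instance (violations : List (List (String × String))) (out : List (String × List (String × Int))) : Decidable (Spec_compute_project_stats_py violations out) := by unfold Spec_compute_project_stats_py; infer_instance

-- ===== CLAIM (what is proved, stated in full; the proofs are below) =====
def Claim_equal_compute_project_stats_py : Prop := ∀ (violations : List (List (String × String))), Dom_compute_project_stats_py violations → Spec_compute_project_stats_py violations (compute_project_stats_py violations)

-- ===== LEMMAS AND PROOFS =====

set_option maxHeartbeats 1000000

-- the table A's fold maintains: first-seen projects, each paired with its recounted row
def pvSpecD (ps : List (String × String)) : PySem.Dict String (PySem.Dict String Int) :=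
  PySem.Dict.mk ((PySem.Set.ofList (ps.map Prod.fst)).map
    (fun p => (p, PySem.Dict.mk (pvRowB ps p))))

lemma pv_row_append_ne (ps : List (String × String)) (p sev q : String) (hq : q ≠ p) :
    pvRowB (ps ++ [(p, sev)]) q = pvRowB ps q := by
  simp [pvRowB, List.count_append, Prod.ext_iff, Ne.symm hq]

lemma pv_row_append_self (ps : List (String × String)) (p sev : String)
    (hsev : sev = "HIGH" ∨ sev = "MEDIUM" ∨ sev = "LOW") :
    PySem.Dict.mk (pvRowB (ps ++ [(p, sev)]) p)
      = ((PySem.Dict.mk (pvRowB ps p)).modify sev 0 (· + 1)).modify "total" 0 (· + 1) := by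
  rcases hsev with h | h | h <;> subst h <;>
    simp [pvRowB, List.count_append, PySem.Dict.modify, PySem.Dict.insert,
      PySem.Dict.getD, PySem.Dict.get?, PySem.Dict.contains] <;> omega

lemma pv_row_not_mem (ps : List (String × String)) (p : String)
    (hp : p ∉ ps.map Prod.fst) : PySem.Dict.mk (pvRowB ps p) = pvTemplate := by
  have hc : ∀ t : String, ps.count (p, t) = 0 := by
    intro t; rw [List.count_eq_zero]; intro hmem; exact hp (List.mem_map_of_mem hmem)
  simp [pvRowB, hc, pvTemplate, PySem.Dict.ofList]
  rfl

lemma pv_get?_mk_map_nodup {ν : Type} (l : List String) (f : String → ν) (x : String) :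
    (PySem.Dict.mk (l.map (fun q => (q, f q)))).get? x
      = if x ∈ l then some (f x) else none := by
  induction l with
  | nil => simp [PySem.Dict.get?]
  | cons a t ih =>
    by_cases hax : a = x
    · subst hax; simp [PySem.Dict.get?]
    · simp only [List.map_cons, PySem.Dict.get?_mk_cons, beq_iff_eq, hax, if_false, ih,
        List.mem_cons]
      simp [Ne.symm hax]

lemma pv_contains_specD (ps : List (String × String)) (x : String) :
    (pvSpecD ps).contains x = decide (x ∈ ps.map Prod.fst) := by
  rw [PySem.Dict.contains_eq_isSome_get?]
  unfold pvSpecD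
  rw [pv_get?_mk_map_nodup]
  by_cases h : x ∈ ps.map Prod.fst <;> simp [h, PySem.Set.mem_ofList]

lemma pv_stepA_spec (ps : List (String × String)) (v : List (String × String)) :
    pvStepA (pvSpecD ps) v = pvSpecD (ps ++ (pvNormB v).toList) := by
  unfold pvStepA pvNormB
  set p := PySem.Str.strip (((PySem.Dict.mk v).get? "project").getD "") with hp
  by_cases hpe : p = ""
  · simp [hpe]
  · set sev0 := (PySem.Dict.mk v).getD "severity" "LOW" with hsev0
    set sev := if sev0 = "HIGH" ∨ sev0 = "MEDIUM" ∨ sev0 = "LOW" then sev0 else "LOW" with hsev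
    have hsev3 : sev = "HIGH" ∨ sev = "MEDIUM" ∨ sev = "LOW" := by
      rw [hsev]; split_ifs with h
      · exact h
      · right; right; rfl
    simp only [hpe, if_false, Option.toList_some]
    rw [← hsev]
    -- collapse the two inserts
    rw [PySem.Dict.get?_insert_self]
    simp only [Option.getD_some]
    have hgen := pv_get?_mk_map_nodup (PySem.Set.ofList (ps.map Prod.fst))
      (fun q => PySem.Dict.mk (pvRowB ps q)) p
    by_cases hmem : p ∈ ps.map Prod.fst
    · -- existing project: insert overwrites in place
      have hget : (pvSpecD ps).get? p = some (PySem.Dict.mk (pvRowB ps p)) := by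
        unfold pvSpecD; rw [hgen]; simp [PySem.Set.mem_ofList, hmem]
      rw [hget]
      simp only [Option.getD_some]
      rw [PySem.Dict.insert_insert_self, ← pv_row_append_self ps p sev hsev3]
      have hcon : (pvSpecD ps).contains p = true := by
        rw [pv_contains_specD]; simpa using hmem
      apply PySem.Dict.ext
      rw [PySem.Dict.items_insert_of_contains _ _ hcon]
      unfold pvSpecD
      have hS' : PySem.Set.ofList ((ps ++ [(p, sev)]).map Prod.fst)
          = PySem.Set.ofList (ps.map Prod.fst) := by
        rw [List.map_append, PySem.Set.ofList_append]
        simp [PySem.Set.update, PySem.Set.add_of_mem, PySem.Set.mem_ofList, hmem]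
      rw [hS', List.map_map]
      apply List.map_congr_left
      intro q hq
      by_cases hqp : q = p
      · subst hqp; simp
      · simp [Function.comp, hqp, pv_row_append_ne ps p sev q hqp]
    · -- new project: insert appends
      have hget : (pvSpecD ps).get? p = none := by
        unfold pvSpecD; rw [hgen]; simp [PySem.Set.mem_ofList, hmem]
      rw [hget]
      simp only [Option.getD_none]
      rw [PySem.Dict.insert_insert_self, ← pv_row_not_mem ps p hmem,
        ← pv_row_append_self ps p sev hsev3]
      have hcon : (pvSpecD ps).contains p = false := by
        rw [pv_contains_specD]; simpa using hmem
      apply PySem.Dict.ext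
      rw [PySem.Dict.items_insert_of_not_contains _ _ hcon]
      unfold pvSpecD
      have hS' : PySem.Set.ofList ((ps ++ [(p, sev)]).map Prod.fst)
          = PySem.Set.ofList (ps.map Prod.fst) ++ [p] := by
        rw [List.map_append, PySem.Set.ofList_append]
        simp [PySem.Set.update, PySem.Set.add_of_not_mem, PySem.Set.mem_ofList, hmem]
      rw [hS', List.map_append]
      congr 1
      apply List.map_congr_left
      intro q hq
      have hqp : q ≠ p := by
        intro h; subst h
        exact hmem (by simpa [PySem.Set.mem_ofList] using hq)
      simp [pv_row_append_ne ps p sev q hqp]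

lemma pv_foldA_spec (vs : List (List (String × String))) :
    vs.foldl pvStepA PySem.Dict.empty = pvSpecD (vs.filterMap pvNormB) := by
  induction vs using List.reverseRecOn with
  | nil => rfl
  | append_singleton t v ih =>
    rw [List.foldl_append, List.filterMap_append]
    simp only [List.foldl_cons, List.foldl_nil, ih, List.filterMap_cons, List.filterMap_nil]
    cases h : pvNormB v with
    | none => simpa [h] using pv_stepA_spec (t.filterMap pvNormB) v
    | some x => simpa [h] using pv_stepA_spec (t.filterMap pvNormB) v

lemma pv_alt_eq (violations : List (List (String × String))) :
    compute_project_stats_py_alt violations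
      = (pvSpecD (violations.filterMap pvNormB)).items.map (fun kv => (kv.1, kv.2.items)) := by
  unfold compute_project_stats_py_alt pvSpecD PySem.List.dedup
  have h := PySem.Dict.items_foldl_insert_fresh
      (PySem.Set.ofList ((violations.filterMap pvNormB).map Prod.fst))
      (fun a => a)
      (fun a => PySem.Dict.mk (pvRowB (violations.filterMap pvNormB) a))
      PySem.Dict.empty
      (by intro a _; simp [PySem.Dict.contains_empty])
      (by simpa using PySem.Set.nodup_ofList ((violations.filterMap pvNormB).map Prod.fst))
  simp only [] at h
  dsimp only
  rw [h]
  simp [PySem.Dict.empty]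

-- ===== VERDICT (by name: the statement is the Claim_ definition above) =====
theorem compute_project_stats_py_spec : Claim_equal_compute_project_stats_py := by
  intro violations _
  unfold Spec_compute_project_stats_py compute_project_stats_py
  rw [pv_foldA_spec, pv_alt_eq]
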